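-- pv_equiv track=rewrite | github.com/jrissiotti/SAFEKEY-VAULT | src/busqueda/buscador.py | buscar_recursiva_general
-- ===== SOURCE A (Python) =====
-- def buscar_recursiva_general(lista, campo, valor, indice=0, resultados=None, exacto=True):
--     """
--     Búsqueda recursiva general
--     exacto=True: coincide exactamente
--     exacto=False: contiene el valor
--     """
--     if resultados is None:
--         resultados = []
--
--     # Caso base
--     if indice >= len(lista):
--         return resultados
--
--     item = lista[indice]
--
--     if campo in item:
--         campo_valor = item[campo].lower()
--
--         if exacto:
--             if campo_valor == valor:
--                 resultados.append(item)
--         else: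
--             if valor in campo_valor:
--                 resultados.append(item)
--
--     # Llamada recursiva
--     return buscar_recursiva_general(lista, campo, valor, indice + 1, resultados, exacto)
-- ===== SOURCE B (Python) =====
-- def buscar_recursiva_general(lista, campo, valor, indice=0, resultados=None, exacto=True):
--     if resultados is None:
--         resultados = []
--     for i in range(indice, len(lista)):
--         item = lista[i]
--         if campo in item:
--             campo_valor = item[campo].lower()
--             if (campo_valor == valor) if exacto else (valor in campo_valor):
--                 resultados.append(item)
--     return resultados
-- ===== Notes on version B (the rewrite author's own statement) =====
-- stated objective: idiomatic
-- what changed: Replaces the recursion (one Python call frame per list element, hitting the recursion limit on long lists) by a single iterative for-loop over range(indice, len(lista)), appending to the same resultados list.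
import Mathlib
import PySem

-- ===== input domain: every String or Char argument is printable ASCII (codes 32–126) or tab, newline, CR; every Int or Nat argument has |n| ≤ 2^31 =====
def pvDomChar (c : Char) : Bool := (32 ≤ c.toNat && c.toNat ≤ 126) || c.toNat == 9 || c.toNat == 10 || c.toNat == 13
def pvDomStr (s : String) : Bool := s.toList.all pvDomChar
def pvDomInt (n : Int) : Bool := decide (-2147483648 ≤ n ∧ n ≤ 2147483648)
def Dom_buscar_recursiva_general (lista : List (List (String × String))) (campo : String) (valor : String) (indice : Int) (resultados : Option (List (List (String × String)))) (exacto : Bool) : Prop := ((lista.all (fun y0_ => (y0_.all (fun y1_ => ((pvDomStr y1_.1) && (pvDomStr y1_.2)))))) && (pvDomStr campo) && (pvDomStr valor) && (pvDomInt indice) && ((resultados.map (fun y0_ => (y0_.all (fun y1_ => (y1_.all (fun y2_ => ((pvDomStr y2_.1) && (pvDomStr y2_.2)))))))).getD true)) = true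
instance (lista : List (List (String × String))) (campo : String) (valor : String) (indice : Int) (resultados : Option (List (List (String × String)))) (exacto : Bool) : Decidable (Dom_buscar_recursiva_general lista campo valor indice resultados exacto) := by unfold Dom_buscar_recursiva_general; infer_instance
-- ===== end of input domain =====

-- B replaces A's recursion by a single iterative for-loop over range(indice, len(lista)) (idiomatic;
-- same cost). Both A and B append, in place, to the resultados list the caller passed (same mutation);
-- the theorems are about the RETURN value.

-- ===== PORT A =====
def buscar_recursiva_general (lista : List (List (String × String))) (campo : String) (valor : String) (indice : Int) (resultados : Option (List (List (String × String)))) (exacto : Bool) : List (List (String × String)) :=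
  let res := resultados.getD []        -- if resultados is None: resultados = []
  if _h : (lista.length : Int) ≤ indice then res    -- caso base
  else
    match PySem.List.pyGet? lista indice with       -- item = lista[indice]; none = IndexError (outside Pre_)
    | none => res
    | some item =>
      let res' :=
        match (PySem.Dict.mk item).get? campo with  -- if campo in item: campo_valor = item[campo]
        | none => res
        | some v =>
          let campo_valor := PySem.Str.lower v
          if exacto then
            (if campo_valor == valor then res ++ [item] else res)
          else
            (if PySem.Str.isIn valor campo_valor then res ++ [item] else res)
      buscar_recursiva_general lista campo valor (indice + 1) (some res') exacto
termination_by ((lista.length : Int) - indice).toNat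
decreasing_by omega

-- ===== PORT B =====
def bStep (lista : List (List (String × String))) (campo : String) (valor : String) (exacto : Bool) (acc : List (List (String × String))) (i : Int) : List (List (String × String)) :=
  match PySem.List.pyGet? lista i with  -- item = lista[i]; none = IndexError (outside Pre_)
  | none => acc
  | some item =>
    match (PySem.Dict.mk item).get? campo with
    | none => acc
    | some v =>
      let campo_valor := PySem.Str.lower v
      if (if exacto then campo_valor == valor else PySem.Str.isIn valor campo_valor)
      then acc ++ [item] else acc

def buscar_recursiva_general_alt (lista : List (List (String × String))) (campo : String) (valor : String) (indice : Int) (resultados : Option (List (List (String × String)))) (exacto : Bool) : List (List (String × String)) :=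
  (PySem.List.pyRange indice (lista.length : Int) 1).foldl
    (bStep lista campo valor exacto) (resultados.getD [])

-- ===== PRECONDITION & SPEC =====
-- Pre_ excludes exactly the inputs where the Python A raises IndexError (indice below -len(lista)
-- while the scan is reached); B raises the same IndexError there.
def Pre_buscar_recursiva_general (lista : List (List (String × String))) (campo : String) (valor : String) (indice : Int) (resultados : Option (List (List (String × String)))) (exacto : Bool) : Prop :=
  -(lista.length : Int) ≤ indice
instance (lista : List (List (String × String))) (campo : String) (valor : String) (indice : Int) (resultados : Option (List (List (String × String)))) (exacto : Bool) : Decidable (Pre_buscar_recursiva_general lista campo valor indice resultados exacto) := by unfold Pre_buscar_recursiva_general; infer_instance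

def pvWitness_buscar_recursiva_general : (List (List (String × String))) × String × String × Int × (Option (List (List (String × String)))) × Bool :=
  ([[("n", "Ab")], [("n", "ab")], [("m", "q")]], "n", "ab", 0, none, true)

def Spec_buscar_recursiva_general (lista : List (List (String × String))) (campo : String) (valor : String) (indice : Int) (resultados : Option (List (List (String × String)))) (exacto : Bool) (out : List (List (String × String))) : Prop := out = buscar_recursiva_general_alt lista campo valor indice resultados exacto
instance (lista : List (List (String × String))) (campo : String) (valor : String) (indice : Int) (resultados : Option (List (List (String × String)))) (exacto : Bool) (out : List (List (String × String))) : Decidable (Spec_buscar_recursiva_general lista campo valor indice resultados exacto out) := by unfold Spec_buscar_recursiva_general; infer_instance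

-- ===== CLAIM (what is proved, stated in full; the proofs are below) =====
def Claim_equal_buscar_recursiva_general : Prop := ∀ (lista : List (List (String × String))) (campo : String) (valor : String) (indice : Int) (resultados : Option (List (List (String × String)))) (exacto : Bool), Dom_buscar_recursiva_general lista campo valor indice resultados exacto → Pre_buscar_recursiva_general lista campo valor indice resultados exacto → Spec_buscar_recursiva_general lista campo valor indice resultados exacto (buscar_recursiva_general lista campo valor indice resultados exacto)

-- ===== LEMMAS AND PROOFS =====

lemma buscar_key (n : Nat) : ∀ (lista : List (List (String × String))) (campo valor : String) (indice : Int) (acc : List (List (String × String))) (exacto : Bool),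
    -(lista.length : Int) ≤ indice → ((lista.length : Int) - indice).toNat = n →
    buscar_recursiva_general lista campo valor indice (some acc) exacto
      = (PySem.List.pyRange indice (lista.length : Int) 1).foldl (bStep lista campo valor exacto) acc := by
  induction n with
  | zero =>
    intro lista campo valor indice acc exacto hlo hn
    have hle : (lista.length : Int) ≤ indice := by omega
    rw [buscar_recursiva_general, PySem.List.pyRange_one_eq_nil hle]
    simp [hle]
  | succ m ih =>
    intro lista campo valor indice acc exacto hlo hn
    have hlt : indice < (lista.length : Int) := by omega
    obtain ⟨item, hitem⟩ : ∃ item, PySem.List.pyGet? lista indice = some item := by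
      rcases h : PySem.List.pyGet? lista indice with _ | item
      · rw [PySem.List.pyGet?_eq_none_iff] at h
        exact absurd ⟨hlo, hlt⟩ h
      · exact ⟨item, rfl⟩
    rw [buscar_recursiva_general, PySem.List.pyRange_one_cons hlt, List.foldl_cons,
        dif_neg (not_le.mpr hlt), hitem]
    simp only [Option.getD_some, bStep, hitem]
    rcases hv : (PySem.Dict.mk item).get? campo with _ | v
    · exact ih lista campo valor (indice + 1) acc exacto (by omega) (by omega)
    · cases exacto
      · by_cases hc : PySem.Str.isIn valor (PySem.Str.lower v) = true
        · simp only [Bool.false_eq_true, if_false, hc, if_true]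
          exact ih lista campo valor (indice + 1) (acc ++ [item]) false (by omega) (by omega)
        · simp only [Bool.false_eq_true, if_false, hc]
          exact ih lista campo valor (indice + 1) acc false (by omega) (by omega)
      · by_cases hc : (PySem.Str.lower v == valor) = true
        · simp only [if_true, hc]
          exact ih lista campo valor (indice + 1) (acc ++ [item]) true (by omega) (by omega)
        · simp only [if_true, hc]
          exact ih lista campo valor (indice + 1) acc true (by omega) (by omega)

lemma buscar_none_eq_some_nil (lista : List (List (String × String))) (campo valor : String) (indice : Int) (exacto : Bool) :
    buscar_recursiva_general lista campo valor indice none exacto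
      = buscar_recursiva_general lista campo valor indice (some []) exacto := by
  rw [buscar_recursiva_general, buscar_recursiva_general]
  simp

-- ===== VERDICT (by name: the statement is the Claim_ definition above) =====
theorem buscar_recursiva_general_spec : Claim_equal_buscar_recursiva_general := by
  intro lista campo valor indice resultados exacto _hdom hpre
  unfold Spec_buscar_recursiva_general buscar_recursiva_general_alt
  rcases resultados with _ | acc
  · rw [buscar_none_eq_some_nil]
    exact buscar_key _ lista campo valor indice [] exacto hpre rfl
  · exact buscar_key _ lista campo valor indice acc exacto hpre rfl
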